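-- pv_equiv track=rewrite | github.com/INF1007-2021A/2021a-c01-ch5-exercices-imeneghazi | exercice.py | verify_ages
-- ===== SOURCE A (Python) =====
-- from typing import List
--
-- def verify_ages(groups: List[List[int]]) -> List[bool]:
--     #liste_a_supprimer = []
--     liste_booleenne = [n*0 for n in groups]
--     for i in range(len(groups)):
--         temp1 = 0
--         temp2 = 0
--         temp3 = 0
--         temp4 = 18
--         if len(groups[i]) > 10 or len(groups[i]) <= 3:
--             #liste_a_supprimer.append(groups[i])
--             liste_booleenne[i] = False
--         for j in range(len(groups[i])):
--             if groups[i][j] == 25: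
--                 temp3 = 25
--                 break
--             elif groups[i][j] < 18:
--                 temp4 = groups[i][j]
--             elif groups[i][j] > 70:
--                 temp1 = groups[i][j]
--             elif groups[i][j] == 50:
--                 temp2 = 50
--         if temp2 == 50 and temp1 > 70 and temp3 != 25:
--             #liste_a_supprimer.append(groups[i])
--             liste_booleenne[i] = False
--         elif temp4 < 18 and temp3 != 25:
--             liste_booleenne[i] = False
--     #for element in liste_a_supprimer:
--     #    groups.remove(element)
--     for k in range(len(liste_booleenne)):
--         if liste_booleenne[k] != False:
--             liste_booleenne[k] = True
--     #si on veut retourner la liste sans les groupes qui ont été refusé on return groups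
--     return liste_booleenne
--
--     # Version du prof
--     acceptance = []
--     for group in groups:
--         if len(group) > 10 or len(group) <= 3:
--             acceptance.append(False)
--             continue
--         if 25 in group:
--             acceptance.append(True)
--             continue
--         if (min(group) < 18) or (50 in group and max(group) > 70):
--             acceptance.append(False)
--             continue
--         acceptance.append(True)
--     return acceptance
-- ===== SOURCE B (Python) =====
-- from typing import List
--
-- def verify_ages(groups: List[List[int]]) -> List[bool]:
--     acceptance = []
--     for group in groups:
--         if len(group) > 10 or len(group) <= 3:
--             acceptance.append(False)
--         elif 25 in group:
--             acceptance.append(True)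
--         elif min(group) < 18 or (50 in group and max(group) > 70):
--             acceptance.append(False)
--         else:
--             acceptance.append(True)
--     return acceptance
-- ===== Notes on version B (the rewrite author's own statement) =====
-- stated objective: simpler
-- what changed: Replaces A's single accumulating pass with four temp flags, an early break and two post-loop fixup passes by a per-group classifier built from independent library scans (length guard, `25 in group`, min/max and `50 in group`), which run at C speed.
import Mathlib
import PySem

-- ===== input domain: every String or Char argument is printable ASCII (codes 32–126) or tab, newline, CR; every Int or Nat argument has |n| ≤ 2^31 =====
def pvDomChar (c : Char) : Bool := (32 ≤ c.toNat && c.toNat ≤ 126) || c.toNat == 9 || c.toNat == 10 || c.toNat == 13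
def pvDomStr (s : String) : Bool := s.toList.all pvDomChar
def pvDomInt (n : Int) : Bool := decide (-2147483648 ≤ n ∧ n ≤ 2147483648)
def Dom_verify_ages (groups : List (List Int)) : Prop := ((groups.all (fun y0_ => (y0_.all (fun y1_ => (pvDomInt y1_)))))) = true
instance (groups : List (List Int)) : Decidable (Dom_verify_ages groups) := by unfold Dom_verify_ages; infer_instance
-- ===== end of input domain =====

-- ===== PORT A =====
-- B replaces A's accumulating flag pass by independent per-group library scans (simpler decomposition, same cost).
-- A's single pass: temps (temp1,temp2,temp3,temp4) with an early break at 25; the placeholder [] left in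
-- liste_booleenne by `[n*0 for n in groups]` (truthy, mapped to True by the final loop) is modelled as `none`.
def pvScanA : List Int → Int × Int × Int × Int → Int × Int × Int × Int
  | [], t => t
  | x :: xs, (t1, t2, t3, t4) =>
    if x = 25 then (t1, t2, 25, t4)
    else if x < 18 then pvScanA xs (t1, t2, t3, x)
    else if x > 70 then pvScanA xs (x, t2, t3, t4)
    else if x = 50 then pvScanA xs (t1, 50, t3, t4)
    else pvScanA xs (t1, t2, t3, t4)

def pvGroupA (g : List Int) : Option Bool :=
  let b0 : Option Bool := if g.length > 10 ∨ g.length ≤ 3 then some false else none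
  let t := pvScanA g (0, 0, 0, 18)
  if t.2.1 = 50 ∧ t.1 > 70 ∧ t.2.2.1 ≠ 25 then some false
  else if t.2.2.2 < 18 ∧ t.2.2.1 ≠ 25 then some false
  else b0

def verify_ages (groups : List (List Int)) : List Bool :=
  -- first loop fills liste_booleenne; the final loop turns every non-False entry into True
  (groups.map pvGroupA).map (fun o => if o ≠ some false then true else false)

-- ===== PORT B =====
def pvGroupB (g : List Int) : Bool :=
  if g.length > 10 ∨ g.length ≤ 3 then false
  else if (25 : Int) ∈ g then true
  else if ((match PySem.List.min? g (fun x => x) with | some m => decide (m < 18) | none => false)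
        || (decide ((50 : Int) ∈ g)
            && (match PySem.List.max? g (fun x => x) with | some M => decide (M > 70) | none => false))) then false
  else true

def verify_ages_alt (groups : List (List Int)) : List Bool :=
  groups.map pvGroupB

-- ===== PRECONDITION & SPEC =====
def Spec_verify_ages (groups : List (List Int)) (out : List Bool) : Prop := out = verify_ages_alt groups
instance (groups : List (List Int)) (out : List Bool) : Decidable (Spec_verify_ages groups out) := by unfold Spec_verify_ages; infer_instance

-- ===== CLAIM (what is proved, stated in full; the proofs are below) =====
def Claim_equal_verify_ages : Prop := ∀ (groups : List (List Int)), Dom_verify_ages groups → Spec_verify_ages groups (verify_ages groups)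

-- ===== LEMMAS AND PROOFS =====

theorem pvScanA_t3_mem (g : List Int) (h : (25 : Int) ∈ g) (t1 t2 t3 t4 : Int) :
    (pvScanA g (t1, t2, t3, t4)).2.2.1 = 25 := by
  induction g generalizing t1 t2 t3 t4 with
  | nil => simp at h
  | cons x xs ih =>
    by_cases hx : x = 25
    · simp [pvScanA, hx]
    · rcases List.mem_cons.mp h with h25 | h25
      · exact absurd h25.symm hx
      · simp only [pvScanA, if_neg hx]
        split_ifs <;> exact ih h25 _ _ _ _

theorem pvScanA_t3_not (g : List Int) (h : (25 : Int) ∉ g) (t1 t2 t3 t4 : Int) :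
    (pvScanA g (t1, t2, t3, t4)).2.2.1 = t3 := by
  induction g generalizing t1 t2 t3 t4 with
  | nil => simp [pvScanA]
  | cons x xs ih =>
    have hx : x ≠ 25 := fun hh => h (hh ▸ List.mem_cons_self)
    have hxs : (25 : Int) ∉ xs := fun hh => h (List.mem_cons_of_mem _ hh)
    simp only [pvScanA, if_neg hx]
    split_ifs <;> exact ih hxs _ _ _ _

theorem pvScanA_t1 (g : List Int) (h : (25 : Int) ∉ g) (t1 t2 t3 t4 : Int) :
    ((pvScanA g (t1, t2, t3, t4)).1 > 70 ↔ t1 > 70 ∨ ∃ y ∈ g, y > 70) := by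
  induction g generalizing t1 t2 t3 t4 with
  | nil => simp [pvScanA]
  | cons x xs ih =>
    have hx : x ≠ 25 := fun hh => h (hh ▸ List.mem_cons_self)
    have hxs : (25 : Int) ∉ xs := fun hh => h (List.mem_cons_of_mem _ hh)
    simp only [pvScanA, if_neg hx]
    split_ifs with h1 h2 h3
    · rw [ih hxs]; simp only [List.exists_mem_cons_iff]
      have hx70 : ¬ (x > 70) := by omega
      tauto
    · rw [ih hxs]; simp only [List.exists_mem_cons_iff]
      tauto
    · rw [ih hxs]; simp only [List.exists_mem_cons_iff]
      have hx70 : ¬ (x > 70) := by omega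
      tauto
    · rw [ih hxs]; simp only [List.exists_mem_cons_iff]
      tauto

theorem pvScanA_t2 (g : List Int) (h : (25 : Int) ∉ g) (t1 t2 t3 t4 : Int) :
    ((pvScanA g (t1, t2, t3, t4)).2.1 = 50 ↔ t2 = 50 ∨ (50 : Int) ∈ g) := by
  induction g generalizing t1 t2 t3 t4 with
  | nil => simp [pvScanA]
  | cons x xs ih =>
    have hx : x ≠ 25 := fun hh => h (hh ▸ List.mem_cons_self)
    have hxs : (25 : Int) ∉ xs := fun hh => h (List.mem_cons_of_mem _ hh)
    simp only [pvScanA, if_neg hx]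
    split_ifs with h1 h2 h3
    · rw [ih hxs]; simp only [List.mem_cons]
      have : ¬ ((50 : Int) = x) := by omega
      tauto
    · rw [ih hxs]; simp only [List.mem_cons]
      have : ¬ ((50 : Int) = x) := by omega
      tauto
    · rw [ih hxs]; simp only [List.mem_cons]
      have h50 : (50 : Int) = x := h3.symm
      have h5050 : (50 : Int) = 50 := rfl
      tauto
    · rw [ih hxs]; simp only [List.mem_cons]
      have : ¬ ((50 : Int) = x) := fun hh => h3 hh.symm
      tauto

theorem pvScanA_t4 (g : List Int) (h : (25 : Int) ∉ g) (t1 t2 t3 t4 : Int) :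
    ((pvScanA g (t1, t2, t3, t4)).2.2.2 < 18 ↔ t4 < 18 ∨ ∃ y ∈ g, y < 18) := by
  induction g generalizing t1 t2 t3 t4 with
  | nil => simp [pvScanA]
  | cons x xs ih =>
    have hx : x ≠ 25 := fun hh => h (hh ▸ List.mem_cons_self)
    have hxs : (25 : Int) ∉ xs := fun hh => h (List.mem_cons_of_mem _ hh)
    simp only [pvScanA, if_neg hx]
    split_ifs with h1 h2 h3
    · rw [ih hxs]; simp only [List.exists_mem_cons_iff]
      tauto
    · rw [ih hxs]; simp only [List.exists_mem_cons_iff]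
      have : ¬ (x < 18) := h1
      tauto
    · rw [ih hxs]; simp only [List.exists_mem_cons_iff]
      have : ¬ (x < 18) := h1
      tauto
    · rw [ih hxs]; simp only [List.exists_mem_cons_iff]
      have : ¬ (x < 18) := h1
      tauto

theorem pvGroup_eq (g : List Int) :
    (if pvGroupA g ≠ some false then true else false) = pvGroupB g := by
  by_cases hlen : g.length > 10 ∨ g.length ≤ 3
  · have hA : pvGroupA g = some false := by
      simp only [pvGroupA, if_pos hlen]
      split_ifs <;> rfl
    simp [hA, pvGroupB, hlen]
  · have hne : g ≠ [] := by
      intro hg; exact hlen (Or.inr (by simp [hg]))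
    by_cases h25 : (25 : Int) ∈ g
    · have hA : pvGroupA g = none := by
        simp only [pvGroupA, if_neg hlen, pvScanA_t3_mem g h25]
        simp
      simp [hA, pvGroupB, hlen, h25]
    · have ht3 : (pvScanA g (0, 0, 0, 18)).2.2.1 = 0 := pvScanA_t3_not g h25 0 0 0 18
      have ht1 := pvScanA_t1 g h25 0 0 0 18
      have ht2 := pvScanA_t2 g h25 0 0 0 18
      have ht4 := pvScanA_t4 g h25 0 0 0 18
      obtain ⟨m, hm⟩ : ∃ m, PySem.List.min? g (fun x => x) = some m := by
        cases hmin : PySem.List.min? g (fun x => x) with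
        | none => exact absurd ((PySem.List.min?_eq_none_iff _ _).mp hmin) hne
        | some m => exact ⟨m, rfl⟩
      obtain ⟨M, hM⟩ : ∃ M, PySem.List.max? g (fun x => x) = some M := by
        cases hmax : PySem.List.max? g (fun x => x) with
        | none => exact absurd ((PySem.List.max?_eq_none_iff _ _).mp hmax) hne
        | some M => exact ⟨M, rfl⟩
      have hmmem := PySem.List.min?_mem hm
      have hmmin := PySem.List.min?_isMin hm
      have hMmem := PySem.List.max?_mem hM
      have hMmax := PySem.List.max?_isMax hM
      have hmin_iff : (m < 18) ↔ ∃ x ∈ g, x < 18 :=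
        ⟨fun hlt => ⟨m, hmmem, hlt⟩, fun ⟨x, hx, hlt⟩ => lt_of_le_of_lt (hmmin x hx) hlt⟩
      have hmax_iff : (M > 70) ↔ ∃ x ∈ g, x > 70 :=
        ⟨fun hlt => ⟨M, hMmem, hlt⟩, fun ⟨x, hx, hlt⟩ => lt_of_lt_of_le hlt (hMmax x hx)⟩
      by_cases hbad : (∃ x ∈ g, x < 18) ∨ ((50 : Int) ∈ g ∧ ∃ x ∈ g, x > 70)
      · have hdisj : ((pvScanA g (0, 0, 0, 18)).2.1 = 50 ∧ (pvScanA g (0, 0, 0, 18)).1 > 70 ∧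
              (pvScanA g (0, 0, 0, 18)).2.2.1 ≠ 25) ∨
            ((pvScanA g (0, 0, 0, 18)).2.2.2 < 18 ∧ (pvScanA g (0, 0, 0, 18)).2.2.1 ≠ 25) := by
          rcases hbad with hb | ⟨hb1, hb2⟩
          · exact Or.inr ⟨ht4.mpr (Or.inr hb), by rw [ht3]; decide⟩
          · exact Or.inl ⟨ht2.mpr (Or.inr hb1), ht1.mpr (Or.inr hb2), by rw [ht3]; decide⟩
        have hA : pvGroupA g = some false := by
          simp only [pvGroupA, if_neg hlen]
          split_ifs with h1 h2
          · rfl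
          · rfl
          · rcases hdisj with h | h
            exacts [absurd h h1, absurd h h2]
        have hB : pvGroupB g = false := by
          simp only [pvGroupB, if_neg hlen, if_neg h25, hm, hM]
          have : (decide (m < 18) || (decide ((50 : Int) ∈ g) && decide (M > 70))) = true := by
            rcases hbad with hb | ⟨hb1, hb2⟩
            · simp [hmin_iff.mpr hb]
            · simp [hb1, hmax_iff.mpr hb2]
          rw [if_pos this]
        rw [hB, hA]
        simp
      · push Not at hbad
        have hA : pvGroupA g = none := by
          simp only [pvGroupA, if_neg hlen]
          rw [if_neg, if_neg]
          · rintro ⟨hs4, -⟩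
            rcases ht4.mp hs4 with hc | ⟨x, hx, hxx⟩
            · omega
            · exact absurd hxx (by simpa using hbad.1 x hx)
          · rintro ⟨hs2, hs1, -⟩
            rcases ht2.mp hs2 with hc | hc
            · omega
            · rcases ht1.mp hs1 with hc1 | ⟨x, hx, hxx⟩
              · omega
              · exact absurd hxx (by simpa using hbad.2 hc x hx)
        have hB : pvGroupB g = true := by
          simp only [pvGroupB, if_neg hlen, if_neg h25, hm, hM]
          have : (decide (m < 18) || (decide ((50 : Int) ∈ g) && decide (M > 70))) = false := by
            simp only [Bool.or_eq_false_iff, Bool.and_eq_false_iff]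
            constructor
            · simp only [decide_eq_false_iff_not]
              intro hlt
              rcases hmin_iff.mp hlt with ⟨x, hx, hxx⟩
              exact absurd hxx (by simpa using hbad.1 x hx)
            · by_cases h50 : (50 : Int) ∈ g
              · right
                simp only [decide_eq_false_iff_not]
                intro hgt
                rcases hmax_iff.mp hgt with ⟨x, hx, hxx⟩
                exact absurd hxx (by simpa using hbad.2 h50 x hx)
              · left; simp [h50]
          rw [if_neg (by simp [this])]
        rw [hB, hA]
        simp

-- ===== VERDICT (by name: the statement is the Claim_ definition above) =====
theorem verify_ages_spec : Claim_equal_verify_ages := by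
  intro groups _
  unfold Spec_verify_ages verify_ages verify_ages_alt
  rw [List.map_map]
  exact List.map_congr_left (fun g _ => pvGroup_eq g)
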